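-- pv_equiv track=rewrite | github.com/nic89/CSVIGENERENIC89 | kasiski.py | getTuples
-- ===== SOURCE A (Python) =====
-- from math import sqrt
--
-- def getDivisors(n):
-- 	div = []
-- 	for i in range(2, int(sqrt(n)) + 1): ## DON"T NEED TO GO FURHTER THAN sqrt(n), NUMBER THEORY...
-- 		if n % i == 0:
-- 			div.append(i)
-- 	return div
--
-- def getTuples(l):
--     res = {}
--     freq =[]
--     count = 0
--     i = 0
--     while i < len(l): # Loop through all the list
--         elt= l[i:i+3] # Take at least 3-character length for tuples
--         long = len(elt)
--         if long == 3: #should be 3 if not means we are at the end of the list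
--             for j in range(i+1,len(l)): #Find further in the list for the same pattern
--                 if l[i:i+long] == l[j:j+long]: #If match the 3-char check for more
--                     while l[i:i+long] == l[j:j+long]:
--                         long = long + 1
--                     long = long -1
--                     elt = l[i:i+long] # Now we have a tuple
--                     diff = j - i # Compute the distance
--                     freq.extend(getDivisors(diff)) #Add the divisors to the list
--                     print ("%s\ti:%s\tj:%s\tdiff:%s\t\tDivisors:%s" % (elt,i,j, diff,getDivisors(diff))) #Print information about the tuple (can be deleted)
--                     count = count +1
--                     j = j + long + 1
--             i = i + long -3 +1
--         else:
--             i = i + 1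
--     return count, freq
-- ===== SOURCE B (Python) =====
-- from math import isqrt
--
--
-- def _divisors(n):
--     return [d for d in range(2, isqrt(n) + 1) if n % d == 0]
--
--
-- def _lcp(s, t):
--     m = 0
--     for a, b in zip(s, t):
--         if a != b:
--             break
--         m += 1
--     return m
--
--
-- def getTuples(l):
--     n = len(l)
--     sufs = [l[k:] for k in range(n + 1)]
--     count = 0
--     freq = []
--     i = 0
--     while i + 3 <= n:
--         long = 3
--         for j in range(i + 1, n):
--             m = _lcp(sufs[i], sufs[j])
--             if m >= long:
--                 long = m
--                 freq.extend(_divisors(j - i))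
--                 count += 1
--         i += long - 2
--     return count, freq
-- ===== Notes on version B (the rewrite author's own statement) =====
-- stated objective: alternative
-- what changed: B precomputes the suffix list once and decides each candidate pair by a single lazy longest-common-prefix scan of the two suffixes, replacing A's stateful slice-compare-and-extend inner while loop that repeatedly builds and compares slices of growing length; the divisor helper becomes a filter comprehension over isqrt instead of an append loop over float sqrt.
import Mathlib
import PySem

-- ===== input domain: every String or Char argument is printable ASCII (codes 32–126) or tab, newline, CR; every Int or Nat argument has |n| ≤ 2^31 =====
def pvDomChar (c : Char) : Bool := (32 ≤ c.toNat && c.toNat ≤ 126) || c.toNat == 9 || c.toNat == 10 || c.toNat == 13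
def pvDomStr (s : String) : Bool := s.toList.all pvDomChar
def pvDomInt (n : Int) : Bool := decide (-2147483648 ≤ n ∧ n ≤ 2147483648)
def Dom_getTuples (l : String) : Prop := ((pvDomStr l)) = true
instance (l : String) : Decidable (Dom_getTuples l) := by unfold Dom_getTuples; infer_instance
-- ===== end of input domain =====

-- B is a structurally different implementation of A's Kasiski tuple scan: a direct
-- longest-common-prefix scan per suffix pair replaces A's stateful slice-compare-and-extend
-- while loop (equal return values; A's diagnostic print is a side effect not modelled).

-- ===== PORT A =====

-- int(sqrt(n)) ported as Nat.sqrt: exact for the n reachable here (n = j - i ≥ 1, far below 2^52)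
def pyGetDivisors (n : Int) : List Int :=
  (PySem.List.pyRange 2 ((Nat.sqrt n.toNat : Int) + 1) 1).foldl
    (fun div i => if PySem.Int.mod n i = 0 then div ++ [i] else div) []

-- the inner `while l[i:i+long] == l[j:j+long]: long = long + 1` with a totality fuel;
-- fuel cs.length + 2 always suffices (proved where it is used)
def pvWhileExtend (cs : List Char) (i j : Int) (long : Int) : Nat → Int
  | 0 => long
  | fuel + 1 =>
    if PySem.List.slice cs (some i) (some (i + long)) =
       PySem.List.slice cs (some j) (some (j + long)) then
      pvWhileExtend cs i j (long + 1) fuel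
    else long

-- body of A's `for j in range(i+1, len(l))` over the state (count, freq, long);
-- python's dead rebinding `j = j + long + 1` of the for-variable has no effect and is omitted
def pvInnerA (cs : List Char) (i : Int) (st : Int × List Int × Int) (j : Int) :
    Int × List Int × Int :=
  let (count, freq, long) := st
  if PySem.List.slice cs (some i) (some (i + long)) =
     PySem.List.slice cs (some j) (some (j + long)) then
    let long := pvWhileExtend cs i j long (cs.length + 2) - 1
    let diff := j - i
    let freq := freq ++ pyGetDivisors diff
    let count := count + 1
    (count, freq, long)
  else (count, freq, long)

-- A's outer `while i < len(l)` loop; structural recursion on a totality fuel: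
-- i grows by at least 1 per iteration (long stays ≥ 3), so fuel cs.length + 1 always suffices
def pvOuterA (cs : List Char) (fuel : Nat) (i : Int) (count : Int) (freq : List Int) :
    Int × List Int :=
  match fuel with
  | 0 => (count, freq)
  | fuel + 1 =>
    if i < (cs.length : Int) then
      let elt := PySem.List.slice cs (some i) (some (i + 3))
      if (elt.length : Int) = 3 then
        let st := (PySem.List.pyRange (i + 1) (cs.length : Int) 1).foldl (pvInnerA cs i)
          (count, freq, (elt.length : Int))
        pvOuterA cs fuel (i + st.2.2 - 3 + 1) st.1 st.2.1
      else pvOuterA cs fuel (i + 1) count freq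
    else (count, freq)

def getTuples (l : String) : Int × List Int := pvOuterA l.toList (l.toList.length + 1) 0 0 []

-- ===== PORT B =====

-- [d for d in range(2, isqrt(n) + 1) if n % d == 0]
def pvAltDivisors (n : Int) : List Int :=
  (PySem.List.pyRange 2 ((Nat.sqrt n.toNat : Int) + 1) 1).filter
    (fun d => PySem.Int.mod n d = 0)

-- _lcp: count matching leading positions of the zipped pair of strings
def pvLcp : List Char → List Char → Int
  | a :: s, b :: t => if a = b then pvLcp s t + 1 else 0
  | _, _ => 0

-- sufs = [l[k:] for k in range(n + 1)]
def pvSufs (cs : List Char) : List (List Char) :=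
  (PySem.List.pyRange 0 ((cs.length : Int) + 1) 1).map
    (fun k => PySem.List.slice cs (some k) none)

-- body of B's `for j in range(i+1, n)`
def pvInnerB (sufs : List (List Char)) (i : Int) (st : Int × List Int × Int) (j : Int) :
    Int × List Int × Int :=
  let (count, freq, long) := st
  let m := pvLcp (PySem.List.pyGetD sufs i []) (PySem.List.pyGetD sufs j [])
  if long ≤ m then (count + 1, freq ++ pvAltDivisors (j - i), m)
  else (count, freq, long)

-- B's outer `while i + 3 <= n` loop; structural recursion on a totality fuel:
-- i grows by at least 1 per iteration (long stays ≥ 3), so fuel cs.length + 1 always suffices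
def pvOuterB (cs : List Char) (sufs : List (List Char)) (fuel : Nat) (i : Int)
    (count : Int) (freq : List Int) : Int × List Int :=
  match fuel with
  | 0 => (count, freq)
  | fuel + 1 =>
    if i + 3 ≤ (cs.length : Int) then
      let st := (PySem.List.pyRange (i + 1) (cs.length : Int) 1).foldl (pvInnerB sufs i)
        (count, freq, 3)
      pvOuterB cs sufs fuel (i + (st.2.2 - 2)) st.1 st.2.1
    else (count, freq)

def getTuples_alt (l : String) : Int × List Int :=
  pvOuterB l.toList (pvSufs l.toList) (l.toList.length + 1) 0 0 []

-- ===== PRECONDITION & SPEC =====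
def Spec_getTuples (l : String) (out : Int × List Int) : Prop := out = getTuples_alt l
instance (l : String) (out : Int × List Int) : Decidable (Spec_getTuples l out) := by unfold Spec_getTuples; infer_instance

-- ===== CLAIM (what is proved, stated in full; the proofs are below) =====
def Claim_equal_getTuples : Prop := ∀ (l : String), Dom_getTuples l → Spec_getTuples l (getTuples l)

-- ===== LEMMAS AND PROOFS =====

theorem pvInnerB_long_ge (sufs : List (List Char)) (i : Int) (st : Int × List Int × Int)
    (j : Int) (h : 3 ≤ st.2.2) : 3 ≤ (pvInnerB sufs i st j).2.2 := by
  obtain ⟨c, f, lg⟩ := st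
  simp only [pvInnerB]
  split
  · rename_i hm; simp at h ⊢; omega
  · simpa using h

theorem pvFoldInnerB_long_ge (sufs : List (List Char)) (i : Int) :
    ∀ (js : List Int) (st : Int × List Int × Int), 3 ≤ st.2.2 →
      3 ≤ (js.foldl (pvInnerB sufs i) st).2.2 := by
  intro js
  induction js with
  | nil => intro st h; simpa using h
  | cons j rest ih =>
    intro st h
    exact ih _ (pvInnerB_long_ge sufs i st j h)


theorem pvLcp_nonneg : ∀ (xs ys : List Char), 0 ≤ pvLcp xs ys := by
  intro xs
  induction xs with
  | nil => intro ys; cases ys <;> simp [pvLcp]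
  | cons a s ih =>
    intro ys
    cases ys with
    | nil => simp [pvLcp]
    | cons b t =>
      simp only [pvLcp]
      split
      · have := ih t; omega
      · omega

theorem pvLcp_le_right : ∀ (xs ys : List Char), pvLcp xs ys ≤ (ys.length : Int) := by
  intro xs
  induction xs with
  | nil =>
    intro ys
    cases ys with
    | nil => simp [pvLcp]
    | cons b t => simp [pvLcp]; omega
  | cons a s ih =>
    intro ys
    cases ys with
    | nil => simp [pvLcp]
    | cons b t =>
      simp only [pvLcp]
      split
      · have := ih t; simp; omega
      · simp; omega

theorem pvTake_eq_iff_lcp : ∀ (xs ys : List Char) (L : Nat), ys.length < xs.length →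
    (xs.take L = ys.take L ↔ (L : Int) ≤ pvLcp xs ys) := by
  intro xs
  induction xs with
  | nil => intro ys L h; simp at h
  | cons a s ih =>
    intro ys L h
    cases ys with
    | nil =>
      cases L with
      | zero => simp [pvLcp]
      | succ L' => simp [pvLcp]
    | cons b t =>
      cases L with
      | zero =>
        simp only [List.take_zero]
        have := pvLcp_nonneg (a :: s) (b :: t)
        simpa using this
      | succ L' =>
        simp only [List.take_succ_cons, List.cons.injEq]
        simp only [pvLcp]
        by_cases hab : a = b
        · rw [if_pos hab]
          have ht : t.length < s.length := by simp at h; omega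
          rw [ih t L' ht]
          constructor
          · rintro ⟨_, h2⟩; push_cast; omega
          · intro h2; exact ⟨hab, by push_cast at h2 ⊢; omega⟩
        · rw [if_neg hab]
          constructor
          · rintro ⟨h1, _⟩; exact absurd h1 hab
          · intro h2; omega

-- characterisation of A's slice-equality test: for 0 ≤ i < j < n and 0 ≤ long,
-- l[i:i+long] == l[j:j+long]  ↔  long ≤ lcp of the two suffixes
theorem pvSliceEq_iff (cs : List Char) (i j long : Int)
    (hi : 0 ≤ i) (hij : i < j) (hj : j < (cs.length : Int)) (hl : 0 ≤ long) :
    (PySem.List.slice cs (some i) (some (i + long)) =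
     PySem.List.slice cs (some j) (some (j + long))) ↔
    long ≤ pvLcp (cs.drop i.toNat) (cs.drop j.toNat) := by
  have hj0 : 0 ≤ j := by omega
  rw [PySem.List.slice_toNat cs hi (by omega), PySem.List.slice_toNat cs hj0 (by omega)]
  have e1 : (i + long).toNat - i.toNat = long.toNat := by omega
  have e2 : (j + long).toNat - j.toNat = long.toNat := by omega
  rw [e1, e2]
  have hlen : (cs.drop j.toNat).length < (cs.drop i.toNat).length := by
    simp only [List.length_drop]; omega
  rw [pvTake_eq_iff_lcp _ _ long.toNat hlen]
  omega

-- the extension while-loop computes lcp + 1 (the first failing length)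
theorem pvWhileExtend_eq (cs : List Char) (i j : Int)
    (hi : 0 ≤ i) (hij : i < j) (hj : j < (cs.length : Int)) :
    ∀ (fuel : Nat) (long : Int), 0 ≤ long →
      long ≤ pvLcp (cs.drop i.toNat) (cs.drop j.toNat) + 1 →
      (pvLcp (cs.drop i.toNat) (cs.drop j.toNat) + 1 - long).toNat ≤ fuel →
      pvWhileExtend cs i j long fuel = pvLcp (cs.drop i.toNat) (cs.drop j.toNat) + 1 := by
  intro fuel
  induction fuel with
  | zero =>
    intro long h0 hle hf
    simp only [pvWhileExtend]
    omega
  | succ f ih =>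
    intro long h0 hle hf
    simp only [pvWhileExtend]
    by_cases hc : long ≤ pvLcp (cs.drop i.toNat) (cs.drop j.toNat)
    · rw [if_pos ((pvSliceEq_iff cs i j long hi hij hj h0).mpr hc)]
      exact ih (long + 1) (by omega) (by omega) (by omega)
    · rw [if_neg (by rw [pvSliceEq_iff cs i j long hi hij hj h0]; exact hc)]
      omega

theorem pvDivisors_eq (n : Int) : pyGetDivisors n = pvAltDivisors n := by
  unfold pyGetDivisors pvAltDivisors
  have h := PySem.List.foldl_append_if (fun d => decide (PySem.Int.mod n d = 0)) id
      (PySem.List.pyRange 2 ((Nat.sqrt n.toNat : Int) + 1) 1) []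
  simpa using h

-- indexing the precomputed suffix list is dropping
theorem pvSufs_get (cs : List Char) (k : Int) (h0 : 0 ≤ k) (h1 : k ≤ (cs.length : Int)) :
    PySem.List.pyGetD (pvSufs cs) k [] = cs.drop k.toNat := by
  unfold pvSufs
  rw [PySem.List.pyGetD_map_pyRange_of_nonneg _ _ _ _ h0 (by omega)]
  exact PySem.List.slice_from cs h0

-- one inner step of A equals one inner step of B
theorem pvInner_step_eq (cs : List Char) (i j : Int) (st : Int × List Int × Int)
    (hi : 0 ≤ i) (hij : i < j) (hj : j < (cs.length : Int)) (h3 : 3 ≤ st.2.2) :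
    pvInnerA cs i st j = pvInnerB (pvSufs cs) i st j := by
  obtain ⟨c, f, lg⟩ := st
  simp only at h3
  have hj0 : (0:Int) ≤ j := by omega
  have hm : pvLcp (PySem.List.pyGetD (pvSufs cs) i []) (PySem.List.pyGetD (pvSufs cs) j []) =
      pvLcp (cs.drop i.toNat) (cs.drop j.toNat) := by
    rw [pvSufs_get cs i hi (by omega), pvSufs_get cs j hj0 (by omega)]
  set M := pvLcp (cs.drop i.toNat) (cs.drop j.toNat) with hM
  have hM0 : 0 ≤ M := pvLcp_nonneg _ _
  have hMn : M ≤ (cs.length : Int) := by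
    have h1 := pvLcp_le_right (cs.drop i.toNat) (cs.drop j.toNat)
    have h2 : ((cs.drop j.toNat).length : Int) ≤ (cs.length : Int) := by
      simp [List.length_drop]
    omega
  simp only [pvInnerA, pvInnerB, hm]
  by_cases hc : lg ≤ M
  · rw [if_pos ((pvSliceEq_iff cs i j lg hi hij hj (by omega)).mpr hc), if_pos hc]
    have hw : pvWhileExtend cs i j lg (cs.length + 2) = M + 1 := by
      apply pvWhileExtend_eq cs i j hi hij hj _ lg (by omega) (by omega)
      omega
    rw [hw]
    rw [pvDivisors_eq]
    norm_num
  · rw [if_neg (by rw [pvSliceEq_iff cs i j lg hi hij hj (by omega)]; exact hc), if_neg hc]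

-- the whole inner loops agree (fold over any list of indices strictly between i and n)
theorem pvInner_fold_eq (cs : List Char) (i : Int) (hi : 0 ≤ i) :
    ∀ (js : List Int) (st : Int × List Int × Int),
      (∀ j ∈ js, i < j ∧ j < (cs.length : Int)) → 3 ≤ st.2.2 →
      js.foldl (pvInnerA cs i) st = js.foldl (pvInnerB (pvSufs cs) i) st := by
  intro js
  induction js with
  | nil => intro st _ _; rfl
  | cons j rest ih =>
    intro st hmem h3
    have hj := hmem j (by simp)
    simp only [List.foldl_cons]
    rw [pvInner_step_eq cs i j st hi hj.1 hj.2 h3]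
    exact ih _ (fun x hx => hmem x (by simp [hx])) (pvInnerB_long_ge (pvSufs cs) i st j h3)

-- the first-3-characters slice has length min 3 (n - i)
theorem pvEltLen (cs : List Char) (i : Int) (hi : 0 ≤ i) :
    (PySem.List.slice cs (some i) (some (i + 3))).length = min 3 (cs.length - i.toNat) := by
  rw [PySem.List.slice_toNat cs hi (by omega)]
  simp only [List.length_take, List.length_drop]
  omega

-- the outer loops agree whenever the fuel exceeds the number of remaining positions
theorem pvOuter_eq (cs : List Char) :
    ∀ (fuel : Nat) (i count : Int) (freq : List Int), 0 ≤ i →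
      ((cs.length : Int) - i).toNat < fuel →
      pvOuterA cs fuel i count freq = pvOuterB cs (pvSufs cs) fuel i count freq := by
  intro fuel
  induction fuel with
  | zero => intro i count freq _ hk; omega
  | succ k ih =>
    intro i count freq hi hk
    by_cases hin : i < (cs.length : Int)
    · have hlen := pvEltLen cs i hi
      by_cases h3 : i + 3 ≤ (cs.length : Int)
      · -- both loops take a full step
        have he : ((PySem.List.slice cs (some i) (some (i + 3))).length : Int) = 3 := by
          rw [hlen]; omega
        rw [pvOuterA, pvOuterB]
        rw [if_pos hin, if_pos h3]
        simp only [he]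
        have hfold := pvInner_fold_eq cs i hi
          (PySem.List.pyRange (i + 1) (cs.length : Int) 1) (count, freq, 3)
          (fun j hj => by
            rw [PySem.List.mem_pyRange_one] at hj
            exact ⟨by omega, hj.2⟩)
          (by norm_num)
        rw [hfold]
        set st := (PySem.List.pyRange (i + 1) (cs.length : Int) 1).foldl
          (pvInnerB (pvSufs cs) i) (count, freq, 3) with hst
        have hst3 : 3 ≤ st.2.2 := pvFoldInnerB_long_ge (pvSufs cs) i _ _ (by norm_num)
        have harith : i + st.2.2 - 3 + 1 = i + (st.2.2 - 2) := by ring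
        rw [harith]
        exact ih _ st.1 st.2.1 (by omega) (by omega)
      · -- i < n but fewer than 3 characters remain: A steps by 1, B already stopped
        have he : ¬ ((PySem.List.slice cs (some i) (some (i + 3))).length : Int) = 3 := by
          rw [hlen]; omega
        have hB : ∀ (f : Nat) (i' : Int), ¬ (i' + 3 ≤ (cs.length : Int)) →
            pvOuterB cs (pvSufs cs) f i' count freq = (count, freq) := by
          intro f i' h'
          cases f with
          | zero => rfl
          | succ f => rw [pvOuterB]; rw [if_neg h']
        rw [pvOuterA]
        rw [if_pos hin]
        simp only [if_neg he]
        rw [ih (i + 1) count freq (by omega) (by omega)]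
        rw [hB k (i + 1) (by omega), hB (k + 1) i (by omega)]
    · rw [pvOuterA, pvOuterB]
      rw [if_neg (by omega), if_neg (by omega)]

-- ===== VERDICT (by name: the statement is the Claim_ definition above) =====
theorem getTuples_spec : Claim_equal_getTuples := by
  intro l _
  unfold Spec_getTuples getTuples getTuples_alt
  exact pvOuter_eq l.toList (l.toList.length + 1) 0 0 [] (le_refl 0) (by omega)
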